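-- pv_equiv track=rewrite | github.com/sungguenja/other_Algorithmus_problem | programmers_예산.py | solution
-- ===== SOURCE A (Python) =====
-- def solution(budgets,M):
--     answer = 0
--     save_sum = 0
--     if sum(budgets) == M:
--         answer = max(budgets)
--     else:
--         left = 0
--         right = max(budgets)
--         while left<=right:
--             middle = (left+right)//2
--             for_sum = 0
--             for i in budgets:
--                 if i<=middle:
--                     for_sum+=i
--                 else:
--                     for_sum+=middle
--             if for_sum<=M:
--                 if for_sum>save_sum:
--                     save_sum = for_sum
--                     answer = middle
--                 left = middle+1
--             else:
--                 right = middle-1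
--     return answer
-- ===== SOURCE B (Python) =====
-- def solution(budgets, M):
--     # sort + prefix sweep instead of binary search; same selection rule as A:
--     # a cap is reported only when its total spend strictly beats spending nothing
--     mx = max(budgets)
--     s = sum(budgets)
--     if s == M:
--         return mx
--     if s < M:
--         cap, spend = mx, s
--     else:
--         bs = sorted(budgets)
--         pre = 0
--         remaining = len(bs)
--         cap, spend = 0, 0
--         for b in bs:
--             c = (M - pre) // remaining
--             if c < b:
--                 cap, spend = c, pre + c * remaining
--                 break
--             pre += b
--             remaining -= 1
--     return cap if cap >= 0 and spend > 0 else 0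
-- ===== Notes on version B (the rewrite author's own statement) =====
-- stated objective: faster
-- what changed: A's binary search over the cap (an O(n) capped-sum pass per probe, ~log(max budget) probes) is replaced by one sort plus a single prefix-sum sweep that computes the optimal cap in closed form inside the segment where it falls.
import Mathlib
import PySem

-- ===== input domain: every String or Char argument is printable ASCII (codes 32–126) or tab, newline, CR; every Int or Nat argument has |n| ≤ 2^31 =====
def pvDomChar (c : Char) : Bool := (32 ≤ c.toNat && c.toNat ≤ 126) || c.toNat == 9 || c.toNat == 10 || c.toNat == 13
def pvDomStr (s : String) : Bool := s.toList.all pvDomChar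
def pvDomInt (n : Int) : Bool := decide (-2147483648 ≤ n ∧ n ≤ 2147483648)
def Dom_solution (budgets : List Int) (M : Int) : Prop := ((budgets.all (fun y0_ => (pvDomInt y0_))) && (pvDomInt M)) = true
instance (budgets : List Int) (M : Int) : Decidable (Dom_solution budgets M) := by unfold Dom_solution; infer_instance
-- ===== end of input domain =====

-- B replaces A's binary search by a sort + prefix-sum sweep (same return value; no mutation).

-- ===== PORT A =====
-- the inner 'for i in budgets' accumulation of A
def forSum (budgets : List Int) (middle : Int) : Int :=
  budgets.foldl (fun s i => if i ≤ middle then s + i else s + middle) 0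

-- A's while-loop (left/right/save_sum/answer state)
def loopA (budgets : List Int) (M left right save ans : Int) : Int :=
  if h : left ≤ right then
    if forSum budgets (PySem.Int.floordiv (left + right) 2) ≤ M then
      if forSum budgets (PySem.Int.floordiv (left + right) 2) > save then
        loopA budgets M (PySem.Int.floordiv (left + right) 2 + 1) right
          (forSum budgets (PySem.Int.floordiv (left + right) 2))
          (PySem.Int.floordiv (left + right) 2)
      else loopA budgets M (PySem.Int.floordiv (left + right) 2 + 1) right save ans
    else loopA budgets M left (PySem.Int.floordiv (left + right) 2 - 1) save ans
  else ans
termination_by (right + 1 - left).toNat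
decreasing_by
  all_goals
    have hb := PySem.Int.floordiv_two_mid_bounds h
    omega

def solution (budgets : List Int) (M : Int) : Int :=
  if budgets.sum = M then (PySem.List.max? budgets (fun x => x)).getD 0
  else loopA budgets M 0 ((PySem.List.max? budgets (fun x => x)).getD 0) 0 0

-- ===== PORT B =====
-- B's 'for b in bs' sweep with break
def bLoop (M pre remaining : Int) (bs : List Int) (cap spend : Int) : Int × Int :=
  match bs with
  | [] => (cap, spend)
  | b :: rest =>
      if PySem.Int.floordiv (M - pre) remaining < b then
        (PySem.Int.floordiv (M - pre) remaining,
         pre + PySem.Int.floordiv (M - pre) remaining * remaining)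
      else bLoop M (pre + b) (remaining - 1) rest cap spend

def solution_alt (budgets : List Int) (M : Int) : Int :=
  let mx := (PySem.List.max? budgets (fun x => x)).getD 0
  let s := budgets.sum
  if s = M then mx
  else
    let cs := if s < M then (mx, s)
              else bLoop M 0 (budgets.length : Int) (PySem.List.sorted budgets (fun x => x)) 0 0
    if cs.1 ≥ 0 ∧ cs.2 > 0 then cs.1 else 0

-- ===== PRECONDITION & SPEC =====
-- Pre_ excludes only the empty list, on which Python A raises ValueError (max of empty sequence).
def Pre_solution (budgets : List Int) (M : Int) : Prop := budgets ≠ []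
instance (budgets : List Int) (M : Int) : Decidable (Pre_solution budgets M) := by unfold Pre_solution; infer_instance
def pvWitness_solution : List Int × Int := ([1, 2, 3, 5], 9)

def Spec_solution (budgets : List Int) (M : Int) (out : Int) : Prop := out = solution_alt budgets M
instance (budgets : List Int) (M : Int) (out : Int) : Decidable (Spec_solution budgets M out) := by unfold Spec_solution; infer_instance

-- ===== CLAIM (what is proved, stated in full; the proofs are below) =====
def Claim_equal_solution : Prop := ∀ (budgets : List Int) (M : Int), Dom_solution budgets M → Pre_solution budgets M → Spec_solution budgets M (solution budgets M)

-- ===== LEMMAS AND PROOFS =====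

lemma forSum_eq (bs : List Int) (m : Int) :
    forSum bs m = (bs.map (fun b => min b m)).sum := by
  have hf : (fun (s i : Int) => if i ≤ m then s + i else s + m)
      = fun (s i : Int) => s + min i m := by
    funext s i; by_cases h : i ≤ m <;> simp [min_def, h]
  unfold forSum
  rw [hf, PySem.List.foldl_add]
  simp

lemma fsum_mono (bs : List Int) {c d : Int} (h : c ≤ d) :
    forSum bs c ≤ forSum bs d := by
  rw [forSum_eq, forSum_eq]
  exact List.sum_le_sum (fun b _ => min_le_min le_rfl h)

lemma fsum_strict (bs : List Int) {mx c d : Int} (hmem : mx ∈ bs)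
    (h1 : c < mx) (h2 : c < d) : forSum bs c < forSum bs d := by
  rw [forSum_eq, forSum_eq]
  refine List.sum_lt_sum _ _ (fun b _ => min_le_min le_rfl (by omega : c ≤ d)) ⟨mx, hmem, ?_⟩
  have ha : min mx c = c := min_eq_right h1.le
  have hb : c < min mx d := lt_min h1 h2
  omega

lemma fsum_at_max (bs : List Int) {mx : Int} (h : ∀ b ∈ bs, b ≤ mx) :
    forSum bs mx = bs.sum := by
  rw [forSum_eq]
  rw [List.map_congr_left (fun b hb => min_eq_left (h b hb))]
  simp

lemma sum_min_const {l : List Int} {k : Int} (h : ∀ x ∈ l, k ≤ x) :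
    (l.map (fun x => min x k)).sum = k * l.length := by
  rw [List.map_congr_left (fun x hx => min_eq_right (h x hx))]
  rw [PySem.List.sum_map_const_int]
  ring

lemma loopA_infeasible (budgets : List Int) (M l r save ans : Int)
    (h : ∀ c, l ≤ c → c ≤ r → M < forSum budgets c) :
    loopA budgets M l r save ans = ans := by
  rw [loopA]
  split
  · rename_i hlr
    have hb := PySem.Int.floordiv_two_mid_bounds hlr
    have hm := h _ hb.1 hb.2
    rw [if_neg (by omega)]
    exact loopA_infeasible budgets M l (PySem.Int.floordiv (l + r) 2 - 1) save ans
      (fun c hc1 hc2 => h c hc1 (by omega))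
  · rfl
termination_by (r + 1 - l).toNat
decreasing_by omega

lemma loopA_feasible (budgets : List Int) (M mx l r save ans cstar : Int)
    (hmem : mx ∈ budgets) (hrmx : r ≤ mx) (h0 : 0 ≤ l)
    (h1 : l ≤ cstar) (h2 : cstar ≤ r) (h3 : forSum budgets cstar ≤ M)
    (h4 : ∀ c, cstar < c → c ≤ r → M < forSum budgets c)
    (hinv : (save, ans) = if 1 ≤ l ∧ 0 < forSum budgets (l - 1)
        then (forSum budgets (l - 1), l - 1) else (0, 0)) :
    loopA budgets M l r save ans = if 0 < forSum budgets cstar then cstar else 0 := by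
  have hlr : l ≤ r := le_trans h1 h2
  have hSA : (save = 0 ∧ ans = 0) ∨
      (1 ≤ l ∧ 0 < forSum budgets (l - 1) ∧ save = forSum budgets (l - 1) ∧ ans = l - 1) := by
    split_ifs at hinv with hc
    · simp only [Prod.mk.injEq] at hinv
      exact Or.inr ⟨hc.1, hc.2, hinv.1, hinv.2⟩
    · simp only [Prod.mk.injEq] at hinv
      exact Or.inl ⟨hinv.1, hinv.2⟩
  rw [loopA, dif_pos hlr]
  obtain ⟨m, hb, hrw⟩ : ∃ m, (l ≤ m ∧ m ≤ r) ∧ PySem.Int.floordiv (l + r) 2 = m :=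
    ⟨_, PySem.Int.floordiv_two_mid_bounds hlr, rfl⟩
  rw [hrw]
  by_cases hfm : forSum budgets m ≤ M
  · rw [if_pos hfm]
    have hmc : m ≤ cstar := by
      by_contra hcon
      push_neg at hcon
      exact absurd (h4 m hcon hb.2) (not_lt.mpr hfm)
    by_cases hcm : cstar ≤ m
    · have hceq : cstar = m := le_antisymm hcm hmc
      subst hceq
      have hinf : ∀ c, cstar + 1 ≤ c → c ≤ r → M < forSum budgets c :=
        fun c hc1 hc2 => h4 c (by omega) hc2
      by_cases hup : forSum budgets cstar > save
      · rw [if_pos hup, loopA_infeasible budgets M (cstar + 1) r _ _ hinf]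
        have hpos : 0 < forSum budgets cstar := by
          rcases hSA with ⟨hs, -⟩ | ⟨-, hp, hs, -⟩ <;> omega
        rw [if_pos hpos]
      · rw [if_neg hup, loopA_infeasible budgets M (cstar + 1) r _ _ hinf]
        push_neg at hup
        rcases hSA with ⟨hs, ha⟩ | ⟨hl1, hp, hs, ha⟩
        · rw [if_neg (by omega), ha]
        · exfalso
          have := fsum_strict budgets hmem (show l - 1 < mx by omega) (show l - 1 < cstar by omega)
          omega
    · push_neg at hcm
      by_cases hup : forSum budgets m > save
      · rw [if_pos hup]
        have hfmpos : 0 < forSum budgets m := by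
          rcases hSA with ⟨hs, -⟩ | ⟨hl1, hp, hs, -⟩
          · omega
          · have := fsum_strict budgets hmem (show l - 1 < mx by omega) (show l - 1 < m by omega)
            omega
        refine loopA_feasible budgets M mx (m + 1) r (forSum budgets m) m cstar hmem hrmx
          (by omega) (by omega) h2 h3 (fun c hc1 hc2 => h4 c hc1 hc2) ?_
        have hm1 : m + 1 - 1 = m := by ring
        rw [if_pos ⟨by omega, by rw [hm1]; exact hfmpos⟩, hm1]
      · rw [if_neg hup]
        push_neg at hup
        rcases hSA with ⟨hs, ha⟩ | ⟨hl1, hp, hs, ha⟩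
        · refine loopA_feasible budgets M mx (m + 1) r save ans cstar hmem hrmx
            (by omega) (by omega) h2 h3 h4 ?_
          rw [if_neg ?_, hs, ha]
          rintro ⟨-, hpos⟩
          have hm1 : m + 1 - 1 = m := by ring
          rw [hm1] at hpos
          omega
        · exfalso
          have := fsum_strict budgets hmem (show l - 1 < mx by omega) (show l - 1 < m by omega)
          omega
  · rw [if_neg hfm]
    push_neg at hfm
    have hcm : cstar < m := by
      by_contra hcon
      push_neg at hcon
      have := fsum_mono budgets hcon
      omega
    exact loopA_feasible budgets M mx l (m - 1) save ans cstar hmem (by omega) h0 h1 (by omega) h3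
      (fun c hc1 hc2 => h4 c hc1 (by omega)) hinv
termination_by (r + 1 - l).toNat
decreasing_by all_goals omega

lemma bLoop_spec (M : Int) (t : List Int) : ∀ (pre lb cap spend : Int),
    t.Pairwise (· ≤ ·) → (∀ b ∈ t, lb ≤ b) →
    pre + lb * t.length ≤ M → M < pre + t.sum →
    ∃ c, bLoop M pre (t.length : Int) t cap spend
          = (c, pre + (t.map (fun b => min b c)).sum) ∧
        lb ≤ c ∧ pre + (t.map (fun b => min b c)).sum ≤ M ∧
        M < pre + (t.map (fun b => min b (c + 1))).sum := by
  induction t with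
  | nil =>
    intro pre lb cap spend _ _ hle hover
    simp at hle hover
    omega
  | cons b rest ih =>
    intro pre lb cap spend hpw hlb hfeas hover
    have hn : (0 : Int) < ((b :: rest).length : Int) := by
      simp
    rw [bLoop]
    by_cases hsplit : PySem.Int.floordiv (M - pre) ((b :: rest).length : Int) < b
    · rw [if_pos hsplit]
      refine ⟨PySem.Int.floordiv (M - pre) ((b :: rest).length : Int), ?_, ?_, ?_, ?_⟩
      · have hge : ∀ x ∈ b :: rest,
            PySem.Int.floordiv (M - pre) ((b :: rest).length : Int) ≤ x := by
          intro x hx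
          have : b ≤ x := by
            rcases List.mem_cons.mp hx with rfl | hx'
            · exact le_rfl
            · exact (List.pairwise_cons.mp hpw).1 x hx'
          omega
        rw [sum_min_const hge]
      · have := hlb b List.mem_cons_self
        have := (PySem.Int.le_floordiv_iff_mul_le (a := M - pre)
          (b := ((b :: rest).length : Int)) (q := lb) hn).mpr (by
            have := hfeas
            push_cast at this ⊢
            linarith)
        omega
      · have hge : ∀ x ∈ b :: rest,
            PySem.Int.floordiv (M - pre) ((b :: rest).length : Int) ≤ x := by
          intro x hx
          have : b ≤ x := by
            rcases List.mem_cons.mp hx with rfl | hx'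
            · exact le_rfl
            · exact (List.pairwise_cons.mp hpw).1 x hx'
          omega
        rw [sum_min_const hge]
        have h1 := PySem.Int.floordiv_mul_add_mod (M - pre) ((b :: rest).length : Int)
        have h2 := PySem.Int.mod_nonneg (M - pre) hn
        linarith
      · have hge : ∀ x ∈ b :: rest,
            PySem.Int.floordiv (M - pre) ((b :: rest).length : Int) + 1 ≤ x := by
          intro x hx
          have : b ≤ x := by
            rcases List.mem_cons.mp hx with rfl | hx'
            · exact le_rfl
            · exact (List.pairwise_cons.mp hpw).1 x hx'
          omega
        rw [sum_min_const hge]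
        have := (PySem.Int.floordiv_lt_iff_lt_mul (a := M - pre)
          (b := ((b :: rest).length : Int))
          (q := PySem.Int.floordiv (M - pre) ((b :: rest).length : Int) + 1) hn).mp (by omega)
        linarith
    · rw [if_neg hsplit]
      push_neg at hsplit
      have hbM : pre + b * ((b :: rest).length : Int) ≤ M := by
        have := (PySem.Int.le_floordiv_iff_mul_le (a := M - pre)
          (b := ((b :: rest).length : Int)) (q := b) hn).mp hsplit
        linarith
      have hrest : ∀ x ∈ rest, b ≤ x := (List.pairwise_cons.mp hpw).1
      obtain ⟨c, heq, hlc, hle2, hgt2⟩ := ih (pre + b) b cap spend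
        (List.pairwise_cons.mp hpw).2 hrest
        (by
          simp only [List.length_cons] at hbM
          push_cast at hbM
          have hexp : b * ((rest.length : Int) + 1) = b * (rest.length : Int) + b := by ring
          linarith)
        (by simp at hover ⊢; linarith)
      have hlen : ((b :: rest).length : Int) - 1 = (rest.length : Int) := by
        simp
      rw [hlen, heq]
      have hbc : b ≤ c := hlc
      refine ⟨c, ?_, ?_, ?_, ?_⟩
      · have : min b c = b := min_eq_left hbc
        simp only [List.map_cons, List.sum_cons, this]
        ring_nf
      · exact le_trans (hlb b List.mem_cons_self) hbc
      · have : min b c = b := min_eq_left hbc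
        simp only [List.map_cons, List.sum_cons, this]
        linarith
      · have : min b (c + 1) = b := min_eq_left (by omega)
        simp only [List.map_cons, List.sum_cons, this]
        linarith

-- ===== VERDICT (by name: the statement is the Claim_ definition above) =====
theorem solution_spec : Claim_equal_solution := by
  intro budgets M hdom hpre
  unfold Spec_solution
  obtain ⟨hd, tl, rfl⟩ : ∃ hd tl, budgets = hd :: tl := by
    cases budgets with
    | nil => exact absurd rfl hpre
    | cons a b => exact ⟨a, b, rfl⟩
  have hmax : PySem.List.max? (hd :: tl) (fun y => y) = some (tl.foldl max hd) :=
    PySem.List.max?_id_cons hd tl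
  have hmem : tl.foldl max hd ∈ hd :: tl := PySem.List.max?_mem hmax
  have hub : ∀ b ∈ hd :: tl, b ≤ tl.foldl max hd := PySem.List.max?_isMax hmax
  unfold solution solution_alt
  rw [hmax]
  simp only [Option.getD_some]
  set mx := tl.foldl max hd with hmxdef
  set s := (hd :: tl).sum with hsdef
  by_cases hsM : s = M
  · rw [if_pos hsM, if_pos hsM]
  · rw [if_neg hsM, if_neg hsM]
    have hfmx : forSum (hd :: tl) mx = s := fsum_at_max _ hub
    by_cases hlt : s < M
    · rw [if_pos hlt]
      by_cases hmx0 : 0 ≤ mx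
      · have hA := loopA_feasible (hd :: tl) M mx 0 mx 0 0 mx hmem le_rfl le_rfl hmx0 le_rfl
          (by rw [hfmx]; omega)
          (fun c hc1 hc2 => absurd (lt_of_lt_of_le hc1 hc2) (lt_irrefl mx))
          (by rw [if_neg (fun h => absurd h.1 (by norm_num))])
        rw [hA, hfmx]
        split_ifs <;> omega
      · rw [loopA, dif_neg (by omega)]
        rw [if_neg (by rintro ⟨h1, -⟩; omega)]
    · have hgt : M < s := by omega
      rw [if_neg hlt]
      have hperm := PySem.List.sorted_perm (hd :: tl) (fun x => x) false
      obtain ⟨m0, t0, hcons⟩ : ∃ m0 t0,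
          PySem.List.sorted (hd :: tl) (fun x => x) = m0 :: t0 := by
        cases hE : PySem.List.sorted (hd :: tl) (fun x => x) with
        | nil => exact absurd ((PySem.List.sorted_eq_nil_iff _ _ _).mp hE) (by simp)
        | cons a b => exact ⟨a, b, rfl⟩
      have hpw : (PySem.List.sorted (hd :: tl) (fun x => x)).Pairwise (· ≤ ·) :=
        PySem.List.sorted_pairwise (hd :: tl) (fun x => x)
      have hlow : ∀ b ∈ PySem.List.sorted (hd :: tl) (fun x => x), m0 ≤ b := by
        intro b hb
        rw [hcons] at hb hpw
        rcases List.mem_cons.mp hb with rfl | hb'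
        · exact le_rfl
        · exact (List.pairwise_cons.mp hpw).1 b hb'
      have hlen : (((PySem.List.sorted (hd :: tl) (fun x => x)).length : Nat) : Int)
          = (((hd :: tl).length : Nat) : Int) := by
        exact_mod_cast congrArg Nat.cast (PySem.List.length_sorted (hd :: tl) (fun x => x) false)
      have hsum : (PySem.List.sorted (hd :: tl) (fun x => x)).sum = s := hperm.sum_eq
      have hn : (0 : Int) < ((PySem.List.sorted (hd :: tl) (fun x => x)).length : Int) := by
        rw [hcons]; exact_mod_cast Nat.succ_pos t0.length
      have hfeas : (0 : Int) + min m0 (PySem.Int.floordiv M ((PySem.List.sorted (hd :: tl) (fun x => x)).length : Int))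
          * ((PySem.List.sorted (hd :: tl) (fun x => x)).length : Int) ≤ M := by
        have h1 := PySem.Int.floordiv_mul_add_mod M
          ((PySem.List.sorted (hd :: tl) (fun x => x)).length : Int)
        have h2 := PySem.Int.mod_nonneg M hn
        have h3 := mul_le_mul_of_nonneg_right
          (min_le_right m0 (PySem.Int.floordiv M ((PySem.List.sorted (hd :: tl) (fun x => x)).length : Int)))
          (le_of_lt hn)
        linarith
      obtain ⟨c, heq, hlc, hcM, hcM1⟩ := bLoop_spec M (PySem.List.sorted (hd :: tl) (fun x => x))
        0 (min m0 (PySem.Int.floordiv M ((PySem.List.sorted (hd :: tl) (fun x => x)).length : Int))) 0 0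
        hpw (fun b hb => le_trans (min_le_left _ _) (hlow b hb)) hfeas
        (by rw [hsum]; omega)
      rw [← hlen, heq]
      have hfc : ∀ d : Int,
          (0 : Int) + ((PySem.List.sorted (hd :: tl) (fun x => x)).map (fun b => min b d)).sum
            = forSum (hd :: tl) d := by
        intro d
        rw [forSum_eq, zero_add]
        exact (hperm.map _).sum_eq
      have hfcle : forSum (hd :: tl) c ≤ M := by rw [← hfc c]; exact hcM
      have hfc1 : M < forSum (hd :: tl) (c + 1) := by rw [← hfc (c + 1)]; exact hcM1
      by_cases hc0 : 0 ≤ c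
      · have hcmx : c < mx := by
          by_contra hcon
          push_neg at hcon
          have hmono := fsum_mono (hd :: tl) hcon
          rw [hfmx] at hmono
          omega
        have hA := loopA_feasible (hd :: tl) M mx 0 mx 0 0 c hmem le_rfl le_rfl hc0 (by omega) hfcle
          (fun d hd1 hd2 => lt_of_lt_of_le hfc1 (fsum_mono _ (by omega)))
          (by rw [if_neg (fun h => absurd h.1 (by norm_num))])
        rw [hA]
        simp only [ge_iff_le, gt_iff_lt, hfc c]
        split_ifs <;> omega
      · push_neg at hc0
        rw [loopA_infeasible (hd :: tl) M 0 mx 0 0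
          (fun d hd1 hd2 => lt_of_lt_of_le hfc1 (fsum_mono _ (by omega)))]
        rw [if_neg (by rintro ⟨h1, -⟩; omega)]
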